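-- pv_equiv track=rewrite | github.com/mariourquia/cre-skills-plugin | src/skills/residential_multifamily/tailoring/tools/tailoring_tui.py | _match_approver_rule
-- ===== SOURCE A (Python) =====
-- from typing import Any, Iterable
--
-- def _match_approver_rule(
--     key_path: str, rules: dict[str, dict[str, Any]]
-- ) -> dict[str, Any] | None:
--     """Return the rule whose key is the longest prefix of key_path."""
--     best: tuple[int, dict[str, Any]] | None = None
--     for prefix, rule in rules.items():
--         if key_path == prefix or key_path.startswith(prefix + "."):
--             score = len(prefix)
--             if best is None or score > best[0]:
--                 best = (score, rule)
--     return best[1] if best else None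
-- ===== SOURCE B (Python) =====
-- def _match_approver_rule(key_path, rules):
--     """Return the rule whose key is the longest prefix of key_path.
--
--     Instead of scanning every rule, enumerate key_path's dot-boundary
--     prefixes longest-first and return the first one present in rules."""
--     cuts = [i for i, ch in enumerate(key_path) if ch == "."]
--     for cand in [key_path] + [key_path[:i] for i in reversed(cuts)]:
--         if cand in rules:
--             return rules[cand]
--     return None
-- ===== Notes on version B (the rewrite author's own statement) =====
-- stated objective: alternative
-- what changed: Instead of testing every rule key against key_path (prefix check per rule), B enumerates key_path's dot-boundary prefixes longest-first and returns the first one found by dict lookup, so the rules are never scanned.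
import Mathlib
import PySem

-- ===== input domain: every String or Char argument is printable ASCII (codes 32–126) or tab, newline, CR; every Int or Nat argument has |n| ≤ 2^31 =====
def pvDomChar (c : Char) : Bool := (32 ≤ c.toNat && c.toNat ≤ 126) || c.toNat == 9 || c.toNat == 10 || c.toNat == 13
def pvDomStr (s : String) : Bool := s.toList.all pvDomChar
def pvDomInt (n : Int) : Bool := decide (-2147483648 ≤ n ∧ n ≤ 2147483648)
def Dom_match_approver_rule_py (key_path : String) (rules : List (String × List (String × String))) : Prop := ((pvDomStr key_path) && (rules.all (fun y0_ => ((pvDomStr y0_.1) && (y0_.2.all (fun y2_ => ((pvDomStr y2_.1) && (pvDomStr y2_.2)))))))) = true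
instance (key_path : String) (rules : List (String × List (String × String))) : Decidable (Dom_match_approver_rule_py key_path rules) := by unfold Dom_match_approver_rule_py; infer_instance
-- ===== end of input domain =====

-- B replaces A's scan over all rules (prefix test per rule) by enumerating key_path's
-- dot-boundary prefixes longest-first and looking each one up in the rules dict.

-- ===== PORT A =====
-- A's match test: `key_path == prefix or key_path.startswith(prefix + ".")` (on code points)
def pyMatchesA (kl pl : List Char) : Bool :=
  kl == pl || PySem.Chars.startswith kl (pl ++ ['.'])

-- A's loop body: update `best` with (score, rule) when the prefix matches
def pvStep (kl : List Char) (best : Option (Int × List (String × String)))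
    (pr : String × List (String × String)) : Option (Int × List (String × String)) :=
  if pyMatchesA kl pr.1.toList then
    let score : Int := (pr.1.toList.length : Int)    -- score = len(prefix)
    match best with
    | none => some (score, pr.2)
    | some b => if score > b.1 then some (score, pr.2) else some b
  else best

def match_approver_rule_py (key_path : String) (rules : List (String × List (String × String))) :
    Option (List (String × String)) :=
  let kl := key_path.toList
  let best := rules.foldl (pvStep kl) none
  best.map Prod.snd    -- `best[1] if best else None`

-- ===== PORT B =====
-- `cand in rules` / `rules[cand]`: first binding of the key in the association list (dict lookup)
def pyLookup (rules : List (String × List (String × String))) (c : List Char) :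
    Option (List (String × String)) :=
  match rules with
  | [] => none
  | (p, r) :: rest => if p.toList = c then some r else pyLookup rest c

-- `cuts = [i for i, ch in enumerate(key_path) if ch == "."]`
def pyCuts (kl : List Char) : List Int :=
  (PySem.List.enumerate kl).filterMap (fun ic => if ic.2 = '.' then some ic.1 else none)

-- `[key_path] + [key_path[:i] for i in reversed(cuts)]` (i ≥ 0, so key_path[:i] is take)
def pyCands (kl : List Char) : List (List Char) :=
  kl :: (pyCuts kl).reverse.map (fun i => kl.take i.toNat)

def match_approver_rule_py_alt (key_path : String) (rules : List (String × List (String × String))) :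
    Option (List (String × String)) :=
  (pyCands key_path.toList).findSome? (fun c => pyLookup rules c)

-- ===== PRECONDITION & SPEC =====
def Spec_match_approver_rule_py (key_path : String) (rules : List (String × List (String × String))) (out : Option (List (String × String))) : Prop := out = match_approver_rule_py_alt key_path rules
instance (key_path : String) (rules : List (String × List (String × String))) (out : Option (List (String × String))) : Decidable (Spec_match_approver_rule_py key_path rules out) := by unfold Spec_match_approver_rule_py; infer_instance

-- ===== CLAIM (what is proved, stated in full; the proofs are below) =====
def Claim_equal_match_approver_rule_py : Prop := ∀ (key_path : String) (rules : List (String × List (String × String))), Dom_match_approver_rule_py key_path rules → Spec_match_approver_rule_py key_path rules (match_approver_rule_py key_path rules)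

-- ===== LEMMAS AND PROOFS =====

-- merge of two `best` candidates, keeping the earlier one on ties
def pvMerge (b x : Option (Int × List (String × String))) : Option (Int × List (String × String)) :=
  match b, x with
  | b, none => b
  | none, some x => some x
  | some b, some x => if x.1 > b.1 then some x else some b

lemma pvMerge_none_left (x : Option (Int × List (String × String))) : pvMerge none x = x := by
  cases x <;> rfl

lemma pvMerge_assoc (a b c : Option (Int × List (String × String))) :
    pvMerge (pvMerge a b) c = pvMerge a (pvMerge b c) := by
  rcases a with _ | a <;> rcases b with _ | b <;> rcases c with _ | c <;>
    simp only [pvMerge] <;> split_ifs <;> first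
      | rfl
      | (simp only at * ; split_ifs <;> first | rfl | omega)

lemma pvStep_eq_merge (kl : List Char) (b : Option (Int × List (String × String)))
    (pr : String × List (String × String)) :
    pvStep kl b pr = pvMerge b (pvStep kl none pr) := by
  by_cases h : pyMatchesA kl pr.1.toList
  · rcases b with _ | b <;> simp [pvStep, h, pvMerge]
  · rcases b with _ | b <;> simp [pvStep, h, pvMerge]

lemma foldl_pvStep_merge (kl : List Char) (rules : List (String × List (String × String)))
    (b : Option (Int × List (String × String))) :
    rules.foldl (pvStep kl) b = pvMerge b (rules.foldl (pvStep kl) none) := by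
  induction rules generalizing b with
  | nil => simp [List.foldl]; cases b <;> rfl
  | cons pr l ih =>
    simp only [List.foldl_cons]
    rw [ih (pvStep kl b pr), ih (pvStep kl none pr), pvStep_eq_merge kl b pr,
      pvMerge_assoc]

lemma findSome?_congr_mem {α β : Type} (l : List α) (f g : α → Option β)
    (h : ∀ x ∈ l, f x = g x) : l.findSome? f = l.findSome? g := by
  induction l with
  | nil => rfl
  | cons a l ih =>
    rw [List.findSome?_cons, List.findSome?_cons, h a List.mem_cons_self]
    cases g a with
    | none => exact ih (fun x hx => h x (by simp [hx]))
    | some b => rfl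

lemma map_findSome' {α β γ : Type} (l : List α) (f : α → Option β) (g : β → γ) :
    (l.findSome? f).map g = l.findSome? (fun x => (f x).map g) := by
  induction l with
  | nil => rfl
  | cons a l ih =>
    simp only [List.findSome?_cons]
    cases f a with
    | none => simpa using ih
    | some b => rfl

lemma findSome?_none {α β : Type} (l : List α) :
    (l.findSome? (fun _ => (none : Option β))) = none := by
  induction l with
  | nil => rfl
  | cons a l ih => rw [List.findSome?_cons]; exact ih

lemma pyMatchesA_iff (kl pl : List Char) :
    pyMatchesA kl pl = true ↔ pl = kl ∨ (pl ++ ['.']) <+: kl := by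
  simp only [pyMatchesA, Bool.or_eq_true, beq_iff_eq, PySem.Chars.startswith_iff]
  exact or_congr eq_comm Iff.rfl

lemma mem_pyCuts (kl : List Char) (i : Int) :
    i ∈ pyCuts kl ↔ ∃ k, ∃ _ : k < kl.length, kl[k] = '.' ∧ i = (k : Int) := by
  simp only [pyCuts, List.mem_filterMap, PySem.List.mem_enumerate_iff]
  constructor
  · rintro ⟨⟨j, c⟩, ⟨k, hk, hp⟩, hf⟩
    obtain ⟨rfl, rfl⟩ : j = (0 : Int) + k ∧ c = kl[k] := by
      constructor <;> [exact congrArg Prod.fst hp; exact congrArg Prod.snd hp]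
    by_cases hc : kl[k] = '.'
    · simp [hc] at hf; exact ⟨k, hk, hc, by omega⟩
    · simp [hc] at hf
  · rintro ⟨k, hk, hc, rfl⟩
    exact ⟨((0 : Int) + k, kl[k]), ⟨k, hk, rfl⟩, by simp [hc]⟩

lemma pyCuts_pairwise_lt (kl : List Char) : (pyCuts kl).Pairwise (· < ·) := by
  refine List.pairwise_filterMap.mpr ?_
  refine (PySem.List.pairwise_lt_enumerate kl 0).imp ?_
  intro a b hab x hx y hy
  by_cases ha : a.2 = '.' <;> by_cases hb : b.2 = '.' <;> simp [ha, hb] at hx hy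
  omega

-- every candidate matches in A's sense
lemma matches_of_mem_pyCands (kl : List Char) (c : List Char) (h : c ∈ pyCands kl) :
    pyMatchesA kl c = true := by
  rw [pyMatchesA_iff]
  rcases List.mem_cons.mp h with h | h
  · exact Or.inl h
  · simp only [List.mem_map, List.mem_reverse] at h
    obtain ⟨i, hi, rfl⟩ := h
    obtain ⟨k, hk, hc, rfl⟩ := (mem_pyCuts kl i).mp hi
    right
    refine ⟨kl.drop (k + 1), ?_⟩
    rw [Int.toNat_natCast]
    have hd : kl.drop k = '.' :: kl.drop (k + 1) := by
      simpa [hc] using List.drop_eq_getElem_cons (l := kl) (i := k) hk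
    calc (kl.take k ++ ['.']) ++ kl.drop (k + 1)
        = kl.take k ++ kl.drop k := by rw [hd]; simp
      _ = kl := List.take_append_drop _ kl

-- every prefix matching in A's sense is a candidate
lemma mem_pyCands_of_matches (kl : List Char) (pl : List Char) (h : pyMatchesA kl pl = true) :
    pl ∈ pyCands kl := by
  rw [pyMatchesA_iff] at h
  rcases h with rfl | ⟨t, ht⟩
  · exact List.mem_cons_self
  · have hkl : kl = pl ++ '.' :: t := by simpa using ht.symm
    have hk : pl.length < kl.length := by simp [hkl]
    have hget : kl[pl.length]'hk = '.' := by
      simp [hkl]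
    have hmem : (pl.length : Int) ∈ pyCuts kl :=
      (mem_pyCuts kl _).mpr ⟨pl.length, hk, hget, rfl⟩
    have htake : kl.take (Int.toNat (pl.length : Int)) = pl := by
      simp [hkl]
    refine List.mem_cons_of_mem _ ?_
    simp only [List.mem_map, List.mem_reverse]
    exact ⟨(pl.length : Int), hmem, htake⟩

-- candidate lengths are strictly decreasing
lemma pyCands_pairwise (kl : List Char) :
    (pyCands kl).Pairwise (fun a b => b.length < a.length) := by
  have hb : ∀ i ∈ pyCuts kl, 0 ≤ i ∧ i.toNat < kl.length := by
    intro i hi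
    obtain ⟨k, hk, _, rfl⟩ := (mem_pyCuts kl i).mp hi
    constructor <;> omega
  constructor
  · intro b hb'
    simp only [List.mem_map, List.mem_reverse] at hb'
    obtain ⟨i, hi, rfl⟩ := hb'
    obtain ⟨_, h2⟩ := hb i hi
    simp [List.length_take]
    omega
  · rw [List.pairwise_map, List.pairwise_reverse]
    refine (pyCuts_pairwise_lt kl).imp_of_mem ?_
    intro i j hi hj hij
    obtain ⟨hi0, hil⟩ := hb i hi
    obtain ⟨hj0, hjl⟩ := hb j hj
    simp only [List.length_take]
    omega

-- anything A's fold stores carries the candidate's length as its score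
lemma score_of_lookup (l : List (String × List (String × String))) (c : List Char)
    (x : Int × List (String × String))
    (h : (pyLookup l c).map (fun r => ((c.length : Int), r)) = some x) : x.1 = (c.length : Int) := by
  cases hl : pyLookup l c <;> simp [hl] at h
  simp [← h]

-- the heart: A's fold over the rules equals B's longest-first candidate search (with scores)
lemma foldl_eq_findSome (kl : List Char) (rules : List (String × List (String × String))) :
    rules.foldl (pvStep kl) none
      = (pyCands kl).findSome? (fun c => (pyLookup rules c).map (fun r => ((c.length : Int), r))) := by
  induction rules with
  | nil =>
    simp only [List.foldl_nil, pyLookup, Option.map_none]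
    exact (findSome?_none _).symm
  | cons pr l ih =>
    obtain ⟨p, r⟩ := pr
    simp only [List.foldl_cons]
    rw [foldl_pvStep_merge, ih]
    by_cases hm : pyMatchesA kl p.toList
    · -- the new rule matches: its key is a candidate
      have hmem := mem_pyCands_of_matches kl p.toList hm
      obtain ⟨C1, C2, hC⟩ := List.append_of_mem hmem
      have hpw := pyCands_pairwise kl
      rw [hC] at hpw
      rw [List.pairwise_append] at hpw
      obtain ⟨_, hpw2, hcross⟩ := hpw
      rw [List.pairwise_cons] at hpw2
      obtain ⟨hafter, _⟩ := hpw2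
      have hbefore : ∀ c ∈ C1, p.toList.length < c.length := by
        intro c hc; exact hcross c hc p.toList (by simp)
      have hstep : pvStep kl none (p, r) = some ((p.toList.length : Int), r) := by
        simp [pvStep, hm]
      rw [hstep, hC]
      rw [List.findSome?_append, List.findSome?_append, List.findSome?_cons, List.findSome?_cons]
      have hsame1 : ∀ c ∈ C1,
          (pyLookup ((p, r) :: l) c).map (fun r' => ((c.length : Int), r'))
            = (pyLookup l c).map (fun r' => ((c.length : Int), r')) := by
        intro c hc
        have : p.toList ≠ c := by
          intro he; have := hbefore c hc; rw [he] at this; omega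
        simp [pyLookup, this]
      rw [findSome?_congr_mem C1 _ _ hsame1]
      have hp_new : (pyLookup ((p, r) :: l) p.toList).map (fun r' => ((p.toList.length : Int), r'))
          = some ((p.toList.length : Int), r) := by
        simp [pyLookup]
      rw [hp_new]
      cases h1 : C1.findSome? (fun c => (pyLookup l c).map (fun r' => ((c.length : Int), r'))) with
      | some x =>
        obtain ⟨c, hc, hfc⟩ := List.exists_of_findSome?_eq_some h1
        have hx1 : x.1 = (c.length : Int) := score_of_lookup l c x hfc
        have hgt : x.1 > (p.toList.length : Int) := by
          have := hbefore c hc; omega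
        simp only [Option.some_or]
        simp only [pvMerge]
        rw [if_pos hgt]
      | none =>
        cases h2 : (pyLookup l p.toList).map (fun r' => ((p.toList.length : Int), r')) with
        | some y =>
          have hy1 : y.1 = (p.toList.length : Int) := score_of_lookup l p.toList y h2
          show pvMerge (some ((p.toList.length : Int), r)) (some y)
              = some ((p.toList.length : Int), r)
          simp only [pvMerge]
          rw [if_neg (by omega)]
        | none =>
          simp only [Option.none_or]
          cases h3 : C2.findSome? (fun c => (pyLookup l c).map (fun r' => ((c.length : Int), r'))) with
          | some z =>
            obtain ⟨c, hc, hfc⟩ := List.exists_of_findSome?_eq_some h3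
            have hz1 : z.1 = (c.length : Int) := score_of_lookup l c z hfc
            have hlt : ¬ z.1 > (p.toList.length : Int) := by
              have := hafter c hc; omega
            simp only [pvMerge]
            rw [if_neg hlt]
          | none => rfl
    · -- the new rule does not match: its key is no candidate, nothing changes
      have hstep : pvStep kl none (p, r) = none := by simp [pvStep, hm]
      rw [hstep, pvMerge_none_left]
      refine (findSome?_congr_mem _ _ _ ?_).symm
      intro c hc
      have : p.toList ≠ c := by
        intro he
        exact hm (by rw [he]; exact matches_of_mem_pyCands kl c hc)
      simp [pyLookup, this]

-- ===== VERDICT (by name: the statement is the Claim_ definition above) =====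
theorem match_approver_rule_py_spec : Claim_equal_match_approver_rule_py := by
  intro key_path rules _
  show match_approver_rule_py key_path rules = match_approver_rule_py_alt key_path rules
  show (rules.foldl (pvStep key_path.toList) none).map Prod.snd
      = (pyCands key_path.toList).findSome? (fun c => pyLookup rules c)
  rw [foldl_eq_findSome, map_findSome']
  refine findSome?_congr_mem _ _ _ ?_
  intro c _
  cases pyLookup rules c <;> rfl
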